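-- pv_equiv track=rewrite | github.com/shery123pk/shery_todo_app | backend/app/services/file_storage.py | generate_safe_filename
-- ===== SOURCE A (Python) =====
-- def generate_safe_filename(filename: str) -> str:
--     """
--     Generate a safe filename by removing special characters.
--
--     Args:
--         filename: Original filename
--
--     Returns:
--         Safe filename with only alphanumeric characters, dots, and hyphens
--
--     Example:
--         >>> generate_safe_filename("my file@#$.jpg")
--         'my-file.jpg'
--     """
--     # Get extension
--     if "." in filename:
--         name, ext = filename.rsplit(".", 1)
--     else:
--         name, ext = filename, ""
--
--     # Remove/replace special characters
--     safe_name = "".join(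
--         c if c.isalnum() or c in "-_" else "-"
--         for c in name
--     )
--
--     # Remove consecutive hyphens and trim
--     safe_name = "-".join(filter(None, safe_name.split("-")))
--
--     # Reconstruct filename
--     if ext:
--         return f"{safe_name}.{ext.lower()}"
--     return safe_name
-- ===== SOURCE B (Python) =====
-- def generate_safe_filename(filename: str) -> str:
--     # Split off the extension at the last dot (same rule as rsplit(".", 1)).
--     if "." in filename:
--         dot = filename.rindex(".")
--         name, ext = filename[:dot], filename[dot + 1:]
--     else:
--         name, ext = filename, ""
--
--     # Single pass: map each char and collapse/trim hyphens while building.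
--     out = []
--     for c in name:
--         m = c if (c.isalnum() or c == "-" or c == "_") else "-"
--         if m == "-" and (not out or out[-1] == "-"):
--             continue
--         out.append(m)
--     if out and out[-1] == "-":
--         out.pop()
--     safe = "".join(out)
--
--     if ext:
--         return f"{safe}.{ext.lower()}"
--     return safe
-- ===== Notes on version B (the rewrite author's own statement) =====
-- stated objective: simpler
-- what changed: B replaces A's map-then-split/filter/join hyphen normalisation by a single pass that maps each character and skips a hyphen when the output is empty or already ends in one (plus one final pop), and splits the extension by rindex/slicing instead of rsplit.
import Mathlib
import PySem

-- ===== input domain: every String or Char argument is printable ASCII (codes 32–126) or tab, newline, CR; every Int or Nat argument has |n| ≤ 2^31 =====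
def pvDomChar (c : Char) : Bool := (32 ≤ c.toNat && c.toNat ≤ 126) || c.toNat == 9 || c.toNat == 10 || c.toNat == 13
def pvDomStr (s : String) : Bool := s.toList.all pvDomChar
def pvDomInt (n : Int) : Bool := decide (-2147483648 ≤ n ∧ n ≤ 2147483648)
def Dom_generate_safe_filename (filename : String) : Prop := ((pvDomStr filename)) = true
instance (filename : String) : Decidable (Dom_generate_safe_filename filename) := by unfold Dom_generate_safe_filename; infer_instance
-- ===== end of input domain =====

-- B fuses A's map pass and split/filter/join hyphen normalisation into one accumulator loop (objective: simpler, same O(n) cost).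

-- ===== PORT A =====
-- c if c.isalnum() or c in "-_" else "-"
def pvMapA (c : Char) : Char :=
  if PySem.Chars.isalnum c || PySem.Chars.isIn [c] ['-', '_'] then c else '-'

def generate_safe_filename (filename : String) : String :=
  let cs := filename.toList
  -- name, ext = filename.rsplit(".", 1) — hand port of the builtin: split at the LAST '.' (exact)
  let p :=
    if PySem.Chars.isIn ['.'] cs then
      let r := cs.reverse
      (((r.dropWhile (fun c => c != '.')).tail).reverse, (r.takeWhile (fun c => c != '.')).reverse)
    else (cs, ([] : List Char))
  let name := p.1
  let ext := p.2
  -- "".join(generator over name) is the per-character map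
  let safe0 := name.map pvMapA
  -- "-".join(filter(None, safe0.split("-")))
  let safe := PySem.Chars.join ['-'] ((PySem.Chars.splitOn safe0 ['-']).filter (fun q => !q.isEmpty))
  if !ext.isEmpty then String.ofList (safe ++ '.' :: PySem.Chars.lower ext) else String.ofList safe

-- ===== PORT B =====
def generate_safe_filename_alt (filename : String) : String :=
  let cs := filename.toList
  let p :=
    if PySem.Str.isIn "." filename then
      -- dot = filename.rindex("."); slices with 0 ≤ dot < len are take/drop (exact here)
      let dot := cs.length - 1 - cs.reverse.findIdx (fun c => c == '.')
      (cs.take dot, cs.drop (dot + 1))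
    else (cs, ([] : List Char))
  let name := p.1
  let ext := p.2
  -- one pass: map the char, skip a '-' when out is empty or already ends in '-'
  let out := name.foldl (fun acc c =>
      let m := if PySem.Chars.isalnum c || c == '-' || c == '_' then c else '-'
      if m == '-' && (acc.isEmpty || acc.getLast? == some '-') then acc else acc ++ [m]) []
  -- if out and out[-1] == "-": out.pop()
  let safe := if out.getLast? == some '-' then out.dropLast else out
  if !ext.isEmpty then String.ofList (safe ++ '.' :: PySem.Chars.lower ext) else String.ofList safe

-- ===== PRECONDITION & SPEC =====
def Spec_generate_safe_filename (filename : String) (out : String) : Prop := out = generate_safe_filename_alt filename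
instance (filename : String) (out : String) : Decidable (Spec_generate_safe_filename filename out) := by unfold Spec_generate_safe_filename; infer_instance

-- ===== CLAIM (what is proved, stated in full; the proofs are below) =====
def Claim_equal_generate_safe_filename : Prop := ∀ (filename : String), Dom_generate_safe_filename filename → Spec_generate_safe_filename filename (generate_safe_filename filename)

-- ===== LEMMAS AND PROOFS =====

-- simple recursion computing s.split("-") (shown equal to PySem's fuel-based splitOn below)
def pvSplit' : List Char → List Char → List (List Char)
  | [], cur => [cur.reverse]
  | c :: rest, cur => if c = '-' then cur.reverse :: pvSplit' rest [] else pvSplit' rest (c :: cur)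

-- the state automaton of B's loop: true = a '-' would be skipped (output empty or ends in '-')
def pvR : Bool → List Char → List Char
  | _, [] => []
  | b, c :: t => if c = '-' then (if b then pvR true t else '-' :: pvR true t) else c :: pvR false t

def pvPop (l : List Char) : List Char := if l.getLast? == some '-' then l.dropLast else l

theorem pvIsIn_pair (c : Char) :
    PySem.Chars.isIn [c] ['-', '_'] = (c == '-' || c == '_') := by
  rcases h : PySem.Chars.isIn [c] ['-', '_'] with _ | _
  · rw [PySem.Chars.isIn_eq_false_iff] at h
    have : ¬ (c = '-' ∨ c = '_') := by
      intro hc; apply h; rcases hc with rfl | rfl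
      · exact ⟨[], ['_'], rfl⟩
      · exact ⟨['-'], [], rfl⟩
    simp_all [Char.ext_iff]
  · rw [PySem.Chars.isIn_iff_infix] at h
    have hc : c ∈ ['-', '_'] := h.subset (by simp)
    simp only [List.mem_cons, List.not_mem_nil, or_false] at hc
    rcases hc with rfl | rfl <;> simp

theorem pvMapA_eq (c : Char) :
    pvMapA c = (if PySem.Chars.isalnum c || c == '-' || c == '_' then c else '-') := by
  rw [pvMapA, pvIsIn_pair, Bool.or_assoc]

theorem pvIsIn_dot (cs : List Char) :
    PySem.Chars.isIn ['.'] cs = true ↔ '.' ∈ cs := by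
  rw [PySem.Chars.isIn_iff_infix]
  constructor
  · intro h; exact h.subset (by simp)
  · intro h
    obtain ⟨s, t, rfl⟩ := List.append_of_mem h
    exact ⟨s, t, by simp⟩

theorem pvSplitOn_go_eq (fuel : Nat) : ∀ (l cur : List Char) (acc : List (List Char)),
    l.length < fuel → PySem.Chars.splitOn.go ['-'] fuel l cur acc = acc.reverse ++ pvSplit' l cur := by
  induction fuel with
  | zero => intro l cur acc h; omega
  | succ n ih =>
    intro l cur acc h
    match l with
    | [] => simp [PySem.Chars.splitOn.go, pvSplit']
    | c :: rest =>
      rw [PySem.Chars.splitOn.go]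
      by_cases hc : c = '-'
      · subst hc
        simp only [List.isPrefixOf, List.length_cons, beq_self_eq_true, Bool.true_and, if_true]
        rw [show List.drop ([].length + 1) ('-' :: rest) = rest by simp]
        rw [ih rest [] (cur.reverse :: acc) (by simp at h ⊢; omega)]
        simp [pvSplit']
      · have hb : (['-'].isPrefixOf (c :: rest)) = false := by
          simp [List.isPrefixOf]; exact fun hcc => absurd hcc.symm hc
        rw [if_neg (by simp [hb])]
        rw [ih rest (c :: cur) acc (by simp at h ⊢; omega)]
        simp [pvSplit', hc]

theorem pvSplitOn_eq (s : List Char) : PySem.Chars.splitOn s ['-'] = pvSplit' s [] := by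
  rw [PySem.Chars.splitOn, pvSplitOn_go_eq (s.length + 1) s [] [] (by omega)]
  simp

theorem pvFoldl_eq_pvR (t : List Char) : ∀ (acc : List Char) (b : Bool),
    (b = (acc.isEmpty || acc.getLast? == some '-')) →
    t.foldl (fun acc m => if m == '-' && (acc.isEmpty || acc.getLast? == some '-') then acc else acc ++ [m]) acc
      = acc ++ pvR b t := by
  induction t with
  | nil => intro acc b hb; simp [pvR]
  | cons c t ih =>
    intro acc b hb
    simp only [List.foldl_cons]
    by_cases hc : c = '-'
    · subst hc
      rcases b with _ | _
      · rw [if_neg (by simp [← hb]), ih (acc ++ ['-']) true (by simp)]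
        simp [pvR]
      · rw [if_pos (by simp [← hb]), ih acc true hb]
        simp [pvR]
    · rw [if_neg (by simp [hc]), ih (acc ++ [c]) false (by simp [hc])]
      simp [pvR, hc]

theorem pvR_true_nil_iff (t : List Char) : pvR true t = [] ↔ (∀ c ∈ t, c = '-') := by
  induction t with
  | nil => simp [pvR]
  | cons c t ih =>
    by_cases hc : c = '-'
    · subst hc; simpa [pvR] using ih
    · simp [pvR, hc]

theorem pvPop_append (xs ys : List Char) (h : ys ≠ []) : pvPop (xs ++ ys) = xs ++ pvPop ys := by
  unfold pvPop
  rw [List.getLast?_append_of_ne_nil]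
  · split
    · rw [List.dropLast_append_of_ne_nil (l' := xs) (l := ys) h]
    · rfl
  · exact h

theorem pvIntercalate_cons (x : List Char) (l : List (List Char)) (h : l ≠ []) :
    List.intercalate ['-'] (x :: l) = x ++ '-' :: List.intercalate ['-'] l := by
  rcases l with _ | ⟨y, l⟩
  · exact absurd rfl h
  · simp [List.intercalate, List.intersperse]

theorem pvFilterSplit'_ne_nil (t : List Char) : ∀ cur, cur ≠ [] →
    (pvSplit' t cur).filter (fun q => !q.isEmpty) ≠ [] := by
  induction t with
  | nil => intro cur h; simp [pvSplit', h]
  | cons c t ih =>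
    intro cur h
    by_cases hc : c = '-'
    · subst hc; simp [pvSplit', h]
    · simpa [pvSplit', hc] using ih (c :: cur) (by simp)

theorem pvFilterSplit'_nil_iff (t : List Char) :
    (pvSplit' t []).filter (fun q => !q.isEmpty) = [] ↔ (∀ c ∈ t, c = '-') := by
  induction t with
  | nil => simp [pvSplit']
  | cons c t ih =>
    by_cases hc : c = '-'
    · subst hc; simpa [pvSplit'] using ih
    · have := pvFilterSplit'_ne_nil t [c] (by simp)
      simp [pvSplit', hc, this]

theorem pvPop_rev (cur : List Char) (hmem : '-' ∉ cur) : pvPop cur.reverse = cur.reverse := by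
  unfold pvPop
  rw [List.getLast?_reverse]
  cases cur with
  | nil => rfl
  | cons a l =>
    have ha : a ≠ '-' := fun e => hmem (by simp [e])
    simp [ha]

theorem pvMain (n : Nat) : ∀ (t : List Char), t.length ≤ n →
    (pvPop (pvR true t) = List.intercalate ['-'] ((pvSplit' t []).filter (fun q => !q.isEmpty))) ∧
    (∀ cur, cur ≠ [] → '-' ∉ cur →
      pvPop (cur.reverse ++ pvR false t)
        = List.intercalate ['-'] ((pvSplit' t cur).filter (fun q => !q.isEmpty))) := by
  induction n with
  | zero =>
    intro t ht
    have : t = [] := List.eq_nil_of_length_eq_zero (Nat.le_zero.mp ht)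
    subst this
    refine ⟨by simp [pvR, pvSplit', pvPop, List.intercalate], ?_⟩
    intro cur hne hmem
    simp only [pvR, pvSplit', List.append_nil]
    rw [pvPop_rev cur hmem]
    have hce : cur.isEmpty = false := by simp [hne]
    simp [List.filter, hce, List.intercalate]
  | succ n ih =>
    intro t ht
    constructor
    · -- pvPop (pvR true t) = "-".join(filter(None, t.split("-")))
      match t with
      | [] => simp [pvR, pvSplit', pvPop, List.intercalate]
      | c :: rest =>
        by_cases hc : c = '-'
        · subst hc
          have h1 : pvR true ('-' :: rest) = pvR true rest := by simp [pvR]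
          have h2 : pvSplit' ('-' :: rest) [] = [] :: pvSplit' rest [] := by simp [pvSplit']
          rw [h1, h2]
          have := (ih rest (by simp at ht; omega)).1
          simpa using this
        · have h1 : pvR true (c :: rest) = [c].reverse ++ pvR false rest := by simp [pvR, hc]
          have h2 : pvSplit' (c :: rest) [] = pvSplit' rest [c] := by simp [pvSplit', hc]
          rw [h1, h2]
          exact (ih rest (by simp at ht; omega)).2 [c] (by simp) (by simp; exact fun e => hc e.symm)
    · -- the same with a pending non-hyphen token cur
      intro cur hne hmem
      match t with
      | [] =>
        simp only [pvR, pvSplit', List.append_nil]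
        rw [pvPop_rev cur hmem]
        have hce : cur.isEmpty = false := by simp [hne]
        simp [List.filter, hce, List.intercalate]
      | c :: rest =>
        by_cases hc : c = '-'
        · subst hc
          have h1 : pvR false ('-' :: rest) = '-' :: pvR true rest := by simp [pvR]
          have h2 : pvSplit' ('-' :: rest) cur = cur.reverse :: pvSplit' rest [] := by simp [pvSplit']
          have hfil : ((cur.reverse :: pvSplit' rest []).filter (fun q => !q.isEmpty))
              = cur.reverse :: ((pvSplit' rest []).filter (fun q => !q.isEmpty)) := by
            have hce : cur.isEmpty = false := by simp [hne]
            simp [List.filter, hce]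
          rw [h1, h2, hfil]
          by_cases hz : pvR true rest = []
          · have hall : ∀ c ∈ rest, c = '-' := (pvR_true_nil_iff rest).mp hz
            have hf0 : (pvSplit' rest []).filter (fun q => !q.isEmpty) = [] :=
              (pvFilterSplit'_nil_iff rest).mpr hall
            rw [hz, hf0]
            rw [pvPop_append cur.reverse ['-'] (by simp)]
            simp [pvPop, List.intercalate]
          · have hf0 : (pvSplit' rest []).filter (fun q => !q.isEmpty) ≠ [] := by
              intro h; exact hz ((pvR_true_nil_iff rest).mpr ((pvFilterSplit'_nil_iff rest).mp h))
            rw [pvIntercalate_cons _ _ hf0]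
            have hsp : cur.reverse ++ '-' :: pvR true rest = (cur.reverse ++ ['-']) ++ pvR true rest := by simp
            rw [hsp, pvPop_append _ _ hz, (ih rest (by simp at ht; omega)).1]
            simp
        · have h1 : pvR false (c :: rest) = c :: pvR false rest := by simp [pvR, hc]
          have h2 : pvSplit' (c :: rest) cur = pvSplit' rest (c :: cur) := by simp [pvSplit', hc]
          have h3 : cur.reverse ++ c :: pvR false rest = (c :: cur).reverse ++ pvR false rest := by simp
          rw [h1, h2, h3]
          exact (ih rest (by simp at ht; omega)).2 (c :: cur) (by simp)
            (by simp [hmem]; exact fun e => hc e.symm)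

theorem pvTakeWhile_eq (r : List Char) :
    r.takeWhile (fun c => c != '.') = r.take (r.findIdx (fun c => c == '.')) := by
  induction r with
  | nil => rfl
  | cons a l ih =>
    by_cases h : a = '.'
    · simp [List.findIdx_cons, h]
    · simp [List.findIdx_cons, h, ih, Bool.cond_eq_ite]

theorem pvDropWhile_eq (r : List Char) :
    r.dropWhile (fun c => c != '.') = r.drop (r.findIdx (fun c => c == '.')) := by
  induction r with
  | nil => rfl
  | cons a l ih =>
    by_cases h : a = '.'
    · simp [List.findIdx_cons, h]
    · simp [List.findIdx_cons, h, ih, Bool.cond_eq_ite]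

-- both extension splits give the same pieces when '.' occurs in cs
theorem pvRevTake (l : List Char) (n : Nat) (hn : n ≤ l.length) :
    l.reverse.take n = (l.drop (l.length - n)).reverse := by
  rw [List.reverse_drop]; congr 1; omega

theorem pvRevDrop (l : List Char) (n : Nat) (hn : n ≤ l.length) :
    l.reverse.drop n = (l.take (l.length - n)).reverse := by
  rw [List.reverse_take]; congr 1; omega

theorem pvFindIdxDot_lt (cs : List Char) (h : '.' ∈ cs) :
    cs.reverse.findIdx (fun c => c == '.') < cs.length := by
  have hmem : '.' ∈ cs.reverse := by simpa using h
  have h1 : cs.reverse.findIdx (fun c => c == '.') < cs.reverse.length :=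
    List.findIdx_lt_length_of_exists ⟨'.', hmem, by simp⟩
  rwa [List.length_reverse] at h1

theorem pvName_eq (cs : List Char) (h : '.' ∈ cs) :
    ((cs.reverse.dropWhile (fun c => c != '.')).tail).reverse
      = cs.take (cs.length - 1 - cs.reverse.findIdx (fun c => c == '.')) := by
  have hj := pvFindIdxDot_lt cs h
  rw [pvDropWhile_eq, List.tail_drop]
  have h2 := pvRevTake cs.reverse (cs.length - 1 - cs.reverse.findIdx (fun c => c == '.'))
      (by simp; omega)
  rw [List.reverse_reverse] at h2
  rw [h2]
  congr 2
  simp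
  omega

theorem pvExt_eq (cs : List Char) (h : '.' ∈ cs) :
    (cs.reverse.takeWhile (fun c => c != '.')).reverse
      = cs.drop ((cs.length - 1 - cs.reverse.findIdx (fun c => c == '.')) + 1) := by
  have hj := pvFindIdxDot_lt cs h
  rw [pvTakeWhile_eq]
  have h2 := pvRevDrop cs.reverse ((cs.length - 1 - cs.reverse.findIdx (fun c => c == '.')) + 1)
      (by simp; omega)
  rw [List.reverse_reverse] at h2
  rw [h2]
  congr 2
  simp
  omega

-- the two hyphen-normalisation passes agree on any name part
theorem pvSafe_eq (name : List Char) :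
    (let out := name.foldl (fun acc c =>
        let m := if PySem.Chars.isalnum c || c == '-' || c == '_' then c else '-'
        if m == '-' && (acc.isEmpty || acc.getLast? == some '-') then acc else acc ++ [m]) []
     if out.getLast? == some '-' then out.dropLast else out)
      = PySem.Chars.join ['-'] ((PySem.Chars.splitOn (name.map pvMapA) ['-']).filter (fun q => !q.isEmpty)) := by
  have hmap : name.map pvMapA
      = name.map (fun c => if PySem.Chars.isalnum c || c == '-' || c == '_' then c else '-') := by
    simp [pvMapA_eq]
  have hfuse : name.foldl (fun acc c =>
        let m := if PySem.Chars.isalnum c || c == '-' || c == '_' then c else '-'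
        if m == '-' && (acc.isEmpty || acc.getLast? == some '-') then acc else acc ++ [m]) []
      = (name.map pvMapA).foldl
          (fun acc m => if m == '-' && (acc.isEmpty || acc.getLast? == some '-') then acc else acc ++ [m]) [] := by
    rw [hmap, List.foldl_map]
  rw [hfuse, pvFoldl_eq_pvR (name.map pvMapA) [] true rfl]
  simp only [List.nil_append]
  rw [show (if (pvR true (name.map pvMapA)).getLast? == some '-' then (pvR true (name.map pvMapA)).dropLast else pvR true (name.map pvMapA))
        = pvPop (pvR true (name.map pvMapA)) from rfl]
  rw [(pvMain (name.map pvMapA).length (name.map pvMapA) le_rfl).1, pvSplitOn_eq]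
  rfl

-- ===== VERDICT (by name: the statement is the Claim_ definition above) =====
theorem generate_safe_filename_spec : Claim_equal_generate_safe_filename := by
  intro filename _
  unfold Spec_generate_safe_filename generate_safe_filename generate_safe_filename_alt
  simp only []
  have hcond : (PySem.Str.isIn "." filename) = PySem.Chars.isIn ['.'] filename.toList := by
    simp [PySem.Str.isIn]
  rw [hcond]
  by_cases hdot : PySem.Chars.isIn ['.'] filename.toList = true
  · rw [if_pos hdot, if_pos hdot]
    have hd : '.' ∈ filename.toList := (pvIsIn_dot filename.toList).mp hdot
    rw [pvName_eq filename.toList hd, pvExt_eq filename.toList hd]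
    rw [pvSafe_eq]
  · rw [if_neg hdot, if_neg hdot]
    rw [pvSafe_eq]
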